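-- pv_equiv track=rewrite | github.com/ismanish/fin_agent_v1 | src/comp_analysis_log.py | _index_sections
-- ===== SOURCE A (Python) =====
-- from typing import Dict, List, Optional, Tuple, Any
--
-- def _index_sections(q_container: Dict[str, Any], k_container: Dict[str, Any]) -> Dict[str, str]:
--     index: Dict[str, str] = {}
--     for sec_name in ("income", "cashflow", "balance"):
--         for key, d in (q_container.get(sec_name, {}) or {}).items():
--             if key not in index:
--                 index[key] = sec_name
--         for key, d in (k_container.get(sec_name, {}) or {}).items():
--             if key not in index:
--                 index[key] = sec_name
--     return index
-- ===== SOURCE B (Python) =====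
-- def _index_sections(q_container, k_container):
--     # One flattened priority stream, then two comprehensions: a reverse pass
--     # fixes each key's value (first occurrence wins), a forward pass fixes order.
--     stream = [(key, sec_name)
--               for sec_name in ("income", "cashflow", "balance")
--               for src in (q_container, k_container)
--               for key in (src.get(sec_name) or {})]
--     vals = {key: sec_name for key, sec_name in reversed(stream)}
--     return {key: vals[key] for key, _ in stream}
-- ===== Notes on version B (the rewrite author's own statement) =====
-- stated objective: alternative
-- what changed: Replaces A's nested section loops with a guarded first-write insertion by one flattened priority stream and two dict comprehensions: a reverse pass where the last write (= first occurrence) fixes each key's section, and a forward pass that fixes insertion order.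
import Mathlib
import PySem

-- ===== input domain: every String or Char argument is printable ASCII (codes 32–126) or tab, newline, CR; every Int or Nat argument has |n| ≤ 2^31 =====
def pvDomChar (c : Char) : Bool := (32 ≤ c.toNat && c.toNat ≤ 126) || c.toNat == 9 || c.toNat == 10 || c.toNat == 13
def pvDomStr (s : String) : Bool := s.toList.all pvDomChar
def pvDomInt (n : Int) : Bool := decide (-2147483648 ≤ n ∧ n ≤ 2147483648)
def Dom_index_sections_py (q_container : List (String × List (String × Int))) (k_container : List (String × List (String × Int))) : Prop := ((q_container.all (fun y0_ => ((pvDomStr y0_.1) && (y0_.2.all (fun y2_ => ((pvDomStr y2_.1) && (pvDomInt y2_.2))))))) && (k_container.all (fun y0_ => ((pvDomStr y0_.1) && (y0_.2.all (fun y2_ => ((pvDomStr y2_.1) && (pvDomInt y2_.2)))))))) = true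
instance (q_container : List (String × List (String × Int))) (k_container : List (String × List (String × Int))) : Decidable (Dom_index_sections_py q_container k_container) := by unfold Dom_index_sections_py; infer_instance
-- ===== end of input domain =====

-- B replaces A's guarded nested insertion with one flattened priority stream and two
-- comprehension passes (reverse pass fixes values, forward pass fixes order); objective: alternative decomposition.

-- ===== PORT A =====
-- inner loop of A: 'for key, d in (….get(sec_name, {}) or {}).items(): if key not in index: index[key] = sec_name'
def pvAInner (index : PySem.Dict String String) (sec : String) (its : List (String × Int)) : PySem.Dict String String :=
  its.foldl (fun d p => if d.contains p.1 then d else d.insert p.1 sec) index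

def index_sections_py (q_container : List (String × List (String × Int))) (k_container : List (String × List (String × Int))) : List (String × String) :=
  -- '.get(sec_name, {}) or {}' : an empty dict is falsy and is replaced by {} (same value)
  (["income", "cashflow", "balance"].foldl
    (fun index sec =>
      pvAInner (pvAInner index sec ((PySem.Dict.mk q_container).getD sec []))
               sec ((PySem.Dict.mk k_container).getD sec []))
    PySem.Dict.empty).items

-- ===== PORT B =====
def pvStream (q_container : List (String × List (String × Int))) (k_container : List (String × List (String × Int))) : List (String × String) :=
  ["income", "cashflow", "balance"].flatMap (fun sec =>
    [PySem.Dict.mk q_container, PySem.Dict.mk k_container].flatMap (fun src =>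
      ((src.getD sec []).map (fun p => (p.1, sec)))))

def index_sections_py_alt (q_container : List (String × List (String × Int))) (k_container : List (String × List (String × Int))) : List (String × String) :=
  let stream := pvStream q_container k_container
  let vals := stream.reverse.foldl (fun d p => d.insert p.1 p.2) PySem.Dict.empty
  -- 'vals[key]' : key is always a key of vals (it comes from stream), so the default "" is never used
  (stream.foldl (fun d p => d.insert p.1 (vals.getD p.1 "")) PySem.Dict.empty).items

-- ===== PRECONDITION & SPEC =====
def Spec_index_sections_py (q_container : List (String × List (String × Int))) (k_container : List (String × List (String × Int))) (out : List (String × String)) : Prop := out = index_sections_py_alt q_container k_container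
instance (q_container : List (String × List (String × Int))) (k_container : List (String × List (String × Int))) (out : List (String × String)) : Decidable (Spec_index_sections_py q_container k_container out) := by unfold Spec_index_sections_py; infer_instance

-- ===== CLAIM (what is proved, stated in full; the proofs are below) =====
def Claim_equal_index_sections_py : Prop := ∀ (q_container : List (String × List (String × Int))) (k_container : List (String × List (String × Int))), Dom_index_sections_py q_container k_container → Spec_index_sections_py q_container k_container (index_sections_py q_container k_container)

-- ===== LEMMAS AND PROOFS =====

-- first value in the stream for a key (what B's reverse pass computes)
def pvFirstVal (s : List (String × String)) (k : String) : String :=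
  ((s.find? (fun p => p.1 == k)).map (·.2)).getD ""

lemma pv_vals_get (s : List (String × String)) (k : String) :
    (s.reverse.foldl (fun d p => d.insert p.1 p.2) PySem.Dict.empty).get? k
      = (s.find? (fun p => p.1 == k)).map (·.2) := by
  induction s with
  | nil => simp [PySem.Dict.get?_empty]
  | cons p t ih =>
      simp only [List.reverse_cons, List.foldl_append, List.foldl_cons, List.foldl_nil,
        List.find?_cons]
      rcases h : (p.1 == k) with _ | _
      · rw [PySem.Dict.get?_insert_of_ne]
        · exact ih
        · exact Ne.symm (by simpa using h)
      · have hk : p.1 = k := by simpa using h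
        subst hk
        simp [PySem.Dict.get?_insert_self]

lemma pv_insert_getD_self (d : PySem.Dict String String) (k : String)
    (hnd : d.keys.Nodup) (hc : d.contains k = true) :
    d.insert k (d.getD k "") = d := by
  apply PySem.Dict.ext
  rw [PySem.Dict.items_insert_of_contains d _ hc]
  conv_rhs => rw [← List.map_id d.items]
  apply List.map_congr_left
  intro p hp
  by_cases hk : p.1 = k
  · have h2 : d.getD p.1 "" = p.2 :=
      PySem.Dict.getD_of_mem_items d (by simpa using hp) hnd ""
    rw [← hk]
    simp [h2]
  · have hpk : (p.1 == k) = false := beq_eq_false_iff_ne.mpr hk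
    simp [hpk]

-- main invariant: the guarded insertion (A) and the value-map insertion (B) agree
lemma pv_main (V : String → String) :
    ∀ (t : List (String × String)) (d : PySem.Dict String String),
    d.keys.Nodup →
    (∀ q ∈ t, d.contains q.1 = true → d.getD q.1 "" = V q.1) →
    (∀ q ∈ t, d.contains q.1 = false → V q.1 = pvFirstVal t q.1) →
    t.foldl (fun d p => if d.contains p.1 then d else d.insert p.1 p.2) d
      = t.foldl (fun d p => d.insert p.1 (V p.1)) d := by
  intro t
  induction t with
  | nil => intro d _ _ _; rfl
  | cons p t ih =>
      intro d hnd H1 H2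
      simp only [List.foldl_cons]
      rcases hc : d.contains p.1 with _ | _
      · -- key is new: both insert, A with p.2, B with V p.1 = first value = p.2
        have hv : V p.1 = p.2 := by
          have := H2 p (List.mem_cons_self) hc
          rw [this]
          simp [pvFirstVal]
        simp only [Bool.false_eq_true, if_false, hv]
        apply ih
        · exact PySem.Dict.nodup_keys_insert _ _ _ hnd
        · intro q hq hcq
          by_cases hk : q.1 = p.1
          · rw [hk, PySem.Dict.getD_insert_self, hv]
          · rw [PySem.Dict.getD_insert_of_ne _ _ _ hk]
            apply H1 q (List.mem_cons_of_mem _ hq)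
            have := PySem.Dict.contains_insert (d := d) (k := p.1) (v := p.2) (k' := q.1)
            rw [this] at hcq
            rcases hdq : d.contains q.1 with _ | _
            · exfalso
              rw [hdq] at hcq
              simp at hcq
              exact hk hcq
            · rfl
        · intro q hq hcq
          have hk : q.1 ≠ p.1 := by
            intro h
            rw [h] at hcq
            rw [PySem.Dict.contains_insert] at hcq
            simp at hcq
          have hdq : d.contains q.1 = false := by
            rw [PySem.Dict.contains_insert] at hcq
            rcases hdq : d.contains q.1 with _ | _
            · rfl
            · rw [hdq] at hcq; simp at hcq
          have hpq : (p.1 == q.1) = false := beq_eq_false_iff_ne.mpr (fun h => hk h.symm)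
          rw [H2 q (List.mem_cons_of_mem _ hq) hdq]
          unfold pvFirstVal
          rw [List.find?_cons_of_neg (by simp [hpq])]
      · -- key already present: A keeps d, B re-inserts the same value (no-op)
        have hvv : d.getD p.1 "" = V p.1 := H1 p (List.mem_cons_self) hc
        rw [show d.insert p.1 (V p.1) = d from hvv ▸ pv_insert_getD_self d p.1 hnd hc]
        apply ih d hnd
        · intro q hq hcq; exact H1 q (List.mem_cons_of_mem _ hq) hcq
        · intro q hq hcq
          have hk : q.1 ≠ p.1 := by
            intro h; rw [h, hc] at hcq; cases hcq
          have hpq : (p.1 == q.1) = false := beq_eq_false_iff_ne.mpr (fun h => hk h.symm)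
          rw [H2 q (List.mem_cons_of_mem _ hq) hcq]
          unfold pvFirstVal
          rw [List.find?_cons_of_neg (by simp [hpq])]

-- A's nested loops are exactly the guarded fold over B's flattened stream
lemma pv_a_eq_stream (q k : List (String × List (String × Int))) :
    index_sections_py q k
      = ((pvStream q k).foldl
          (fun d p => if d.contains p.1 then d else d.insert p.1 p.2)
          PySem.Dict.empty).items := by
  simp [index_sections_py, pvStream, pvAInner, List.foldl_append, List.foldl_map]

-- ===== VERDICT (by name: the statement is the Claim_ definition above) =====
set_option maxHeartbeats 1000000 in
theorem index_sections_py_spec : Claim_equal_index_sections_py := by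
  intro q k _
  unfold Spec_index_sections_py index_sections_py_alt
  rw [pv_a_eq_stream]
  congr 1
  exact pv_main
    (fun x => ((pvStream q k).reverse.foldl (fun d p => d.insert p.1 p.2) PySem.Dict.empty).getD x "")
    (pvStream q k) PySem.Dict.empty
    (by simp [PySem.Dict.keys_empty])
    (by intro q' _ hc; rw [PySem.Dict.contains_empty] at hc; cases hc)
    (by
      intro q' hq' _
      show ((pvStream q k).reverse.foldl (fun d p => d.insert p.1 p.2) PySem.Dict.empty).getD q'.1 "" = pvFirstVal (pvStream q k) q'.1
      rw [PySem.Dict.getD_eq_get?_getD, pv_vals_get]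
      rfl)
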